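-- pv_equiv track=rewrite | github.com/stateofw/socialmedia | app/services/ai.py | _parse_posts_response
-- ===== SOURCE A (Python) =====
-- from typing import Dict, List, Optional
--
-- def _parse_posts_response(content: str) -> List[Dict[str, str]]:
--     """Parse AI response for complete social media posts."""
--     lines = content.strip().split("\n")
--
--     posts = []
--     current_post = {}
--     current_field = None
--     multiline_content = []
--
--     for line in lines:
--         line_stripped = line.strip()
--
--         if line_stripped.startswith("POST"):
--             # Save previous post if it exists
--             if current_post:
--                 # Save any pending multiline content
--                 if current_field and multiline_content:
--                     current_post[current_field] = " ".join(multiline_content)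
--                 if "topic" in current_post:  # Only add if has required fields
--                     posts.append(current_post)
--             current_post = {}
--             current_field = None
--             multiline_content = []
--         elif line_stripped.startswith("TOPIC:"):
--             current_post["topic"] = line_stripped.replace("TOPIC:", "").strip()
--             current_field = None
--         elif line_stripped.startswith("TYPE:"):
--             current_post["content_type"] = line_stripped.replace("TYPE:", "").strip()
--             current_field = None
--         elif line_stripped.startswith("CAPTION:"):
--             caption_text = line_stripped.replace("CAPTION:", "").strip()
--             if caption_text:
--                 multiline_content = [caption_text]
--             else:
--                 multiline_content = []
--             current_field = "caption"
--         elif line_stripped.startswith("HASHTAGS:"):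
--             # Save any pending multiline content
--             if current_field == "caption" and multiline_content:
--                 current_post["caption"] = " ".join(multiline_content)
--                 multiline_content = []
--             current_post["hashtags"] = line_stripped.replace("HASHTAGS:", "").strip()
--             current_field = None
--         elif line_stripped.startswith("CTA:"):
--             current_post["cta"] = line_stripped.replace("CTA:", "").strip()
--             current_field = None
--         elif line_stripped and current_field == "caption":
--             # Continue multiline caption
--             multiline_content.append(line_stripped)
--
--     # Add last post
--     if current_post:
--         if current_field and multiline_content:
--             current_post[current_field] = " ".join(multiline_content)
--         if "topic" in current_post:
--             posts.append(current_post)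
--
--     return posts
-- ===== SOURCE B (Python) =====
-- from typing import Dict, List, Optional
--
--
-- def _parse_block(block: List[str]) -> Dict[str, str]:
--     """Parse one block of lines (no POST markers inside) into a post dict."""
--     d: Dict[str, str] = {}
--     pending: Optional[List[str]] = None  # caption pieces being accumulated, or None
--     for line in block:
--         s = line.strip()
--         if s.startswith("TOPIC:"):
--             d["topic"] = s.replace("TOPIC:", "").strip()
--             pending = None
--         elif s.startswith("TYPE:"):
--             d["content_type"] = s.replace("TYPE:", "").strip()
--             pending = None
--         elif s.startswith("CAPTION:"):
--             text = s.replace("CAPTION:", "").strip()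
--             pending = [text] if text else []
--         elif s.startswith("HASHTAGS:"):
--             if pending:
--                 d["caption"] = " ".join(pending)
--             d["hashtags"] = s.replace("HASHTAGS:", "").strip()
--             pending = None
--         elif s.startswith("CTA:"):
--             d["cta"] = s.replace("CTA:", "").strip()
--             pending = None
--         elif s and pending is not None:
--             pending.append(s)
--     if pending:
--         d["caption"] = " ".join(pending)
--     return d
--
--
-- def _parse_posts_response(content: str) -> List[Dict[str, str]]:
--     """Parse AI response for complete social media posts."""
--     blocks: List[List[str]] = []
--     cur: List[str] = []
--     for line in content.strip().split("\n"):
--         if line.strip().startswith("POST"):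
--             blocks.append(cur)
--             cur = []
--         else:
--             cur.append(line)
--     blocks.append(cur)
--
--     posts = []
--     for block in blocks:
--         d = _parse_block(block)
--         if "topic" in d:
--             posts.append(d)
--     return posts
-- ===== Notes on version B (the rewrite author's own statement) =====
-- stated objective: alternative
-- what changed: B first splits the lines into POST-delimited blocks and then parses each block independently with a small per-block parser whose state is a dict plus an optional pending-caption list, instead of A's single pass that flushes a shared post/field/multiline state at every POST boundary.
import Mathlib
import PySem

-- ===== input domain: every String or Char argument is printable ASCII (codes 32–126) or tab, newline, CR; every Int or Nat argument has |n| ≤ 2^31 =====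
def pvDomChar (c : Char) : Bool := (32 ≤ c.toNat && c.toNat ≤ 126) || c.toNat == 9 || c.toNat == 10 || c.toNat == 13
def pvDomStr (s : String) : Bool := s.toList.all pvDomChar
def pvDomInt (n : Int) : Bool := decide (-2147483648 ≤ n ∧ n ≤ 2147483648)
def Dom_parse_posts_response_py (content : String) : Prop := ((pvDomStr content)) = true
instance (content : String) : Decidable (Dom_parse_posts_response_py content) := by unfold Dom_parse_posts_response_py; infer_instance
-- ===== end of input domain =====

-- B re-implements A by a different decomposition (split into POST-delimited blocks first,
-- then parse each block); same return value, no speed claim.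

-- ===== PORT A =====
-- content.strip().split("\n"); "\n" is a non-empty separator, so split? always returns some
def pvLines (content : String) : List String :=
  (PySem.Str.split? (PySem.Str.strip content) "\n").getD []
-- A's boundary/end flush (the code Python A repeats at a POST line and after the loop):
def pvAFlushInto (posts : List (List (String × String))) (cur : PySem.Dict String String)
    (field : Option String) (ml : List String) : List (List (String × String)) :=
  if cur.items ≠ [] then
    let cur' := match field with
      | some f => if ml ≠ [] then cur.insert f (PySem.Str.join " " ml) else cur
      | none => cur
    if cur'.contains "topic" then posts ++ [cur'.items] else posts
  else posts

-- one iteration of A's loop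
def pvAStep (st : List (List (String × String)) × PySem.Dict String String × Option String × List String)
    (line : String) :
    List (List (String × String)) × PySem.Dict String String × Option String × List String :=
  let posts := st.1; let cur := st.2.1; let field := st.2.2.1; let ml := st.2.2.2
  let s := PySem.Str.strip line
  if PySem.Str.startswith s "POST" then
    (pvAFlushInto posts cur field ml, PySem.Dict.empty, none, [])
  else if PySem.Str.startswith s "TOPIC:" then
    (posts, cur.insert "topic" (PySem.Str.strip (PySem.Str.replace s "TOPIC:" "")), none, ml)
  else if PySem.Str.startswith s "TYPE:" then
    (posts, cur.insert "content_type" (PySem.Str.strip (PySem.Str.replace s "TYPE:" "")), none, ml)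
  else if PySem.Str.startswith s "CAPTION:" then
    let t := PySem.Str.strip (PySem.Str.replace s "CAPTION:" "")
    (posts, cur, some "caption", if t ≠ "" then [t] else [])
  else if PySem.Str.startswith s "HASHTAGS:" then
    let cur := if field = some "caption" ∧ ml ≠ [] then cur.insert "caption" (PySem.Str.join " " ml) else cur
    let ml := if field = some "caption" ∧ ml ≠ [] then ([] : List String) else ml
    (posts, cur.insert "hashtags" (PySem.Str.strip (PySem.Str.replace s "HASHTAGS:" "")), none, ml)
  else if PySem.Str.startswith s "CTA:" then
    (posts, cur.insert "cta" (PySem.Str.strip (PySem.Str.replace s "CTA:" "")), none, ml)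
  else if s ≠ "" ∧ field = some "caption" then
    (posts, cur, field, ml ++ [s])
  else
    (posts, cur, field, ml)

def parse_posts_response_py (content : String) : List (List (String × String)) :=
  let lines := pvLines content
  let st := lines.foldl pvAStep ([], PySem.Dict.empty, none, [])
  pvAFlushInto st.1 st.2.1 st.2.2.1 st.2.2.2

-- ===== PORT B =====
-- one iteration of _parse_block's loop: state (d, pending)
def pvBBlockStep (st : PySem.Dict String String × Option (List String)) (line : String) :
    PySem.Dict String String × Option (List String) :=
  let d := st.1; let p := st.2
  let s := PySem.Str.strip line
  if PySem.Str.startswith s "TOPIC:" then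
    (d.insert "topic" (PySem.Str.strip (PySem.Str.replace s "TOPIC:" "")), none)
  else if PySem.Str.startswith s "TYPE:" then
    (d.insert "content_type" (PySem.Str.strip (PySem.Str.replace s "TYPE:" "")), none)
  else if PySem.Str.startswith s "CAPTION:" then
    let t := PySem.Str.strip (PySem.Str.replace s "CAPTION:" "")
    (d, some (if t ≠ "" then [t] else []))
  else if PySem.Str.startswith s "HASHTAGS:" then
    let d := match p with
      | some q => if q ≠ [] then d.insert "caption" (PySem.Str.join " " q) else d
      | none => d
    (d.insert "hashtags" (PySem.Str.strip (PySem.Str.replace s "HASHTAGS:" "")), none)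
  else if PySem.Str.startswith s "CTA:" then
    (d.insert "cta" (PySem.Str.strip (PySem.Str.replace s "CTA:" "")), none)
  else if s ≠ "" ∧ p ≠ none then
    (d, p.map (· ++ [s]))
  else
    (d, p)

-- final `if pending: d["caption"] = " ".join(pending)` of _parse_block
def pvBFlush (st : PySem.Dict String String × Option (List String)) : PySem.Dict String String :=
  match st.2 with
  | some q => if q ≠ [] then st.1.insert "caption" (PySem.Str.join " " q) else st.1
  | none => st.1

def pvParseBlock (block : List String) : PySem.Dict String String :=
  pvBFlush (block.foldl pvBBlockStep (PySem.Dict.empty, none))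

def pvBSplitStep (st : List (List String) × List String) (line : String) :
    List (List String) × List String :=
  if PySem.Str.startswith (PySem.Str.strip line) "POST" then (st.1 ++ [st.2], [])
  else (st.1, st.2 ++ [line])

def pvBProcStep (posts : List (List (String × String))) (block : List String) :
    List (List (String × String)) :=
  let d := pvParseBlock block
  if d.contains "topic" then posts ++ [d.items] else posts

def parse_posts_response_py_alt (content : String) : List (List (String × String)) :=
  let lines := pvLines content
  let st := lines.foldl pvBSplitStep ([], [])
  (st.1 ++ [st.2]).foldl pvBProcStep []

-- ===== PRECONDITION & SPEC =====
def Spec_parse_posts_response_py (content : String) (out : List (List (String × String))) : Prop := out = parse_posts_response_py_alt content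
instance (content : String) (out : List (List (String × String))) : Decidable (Spec_parse_posts_response_py content out) := by unfold Spec_parse_posts_response_py; infer_instance

-- ===== CLAIM (what is proved, stated in full; the proofs are below) =====
def Claim_equal_parse_posts_response_py : Prop := ∀ (content : String), Dom_parse_posts_response_py content → Spec_parse_posts_response_py content (parse_posts_response_py content)

-- ===== LEMMAS AND PROOFS =====

-- abstraction of A's (field, ml) pair as B's pending
def pvPend (field : Option String) (ml : List String) : Option (List String) :=
  field.map fun _ => ml

-- the posts emitted for one finished block-state
def pvEmit (d : PySem.Dict String String) (p : Option (List String)) : List (List (String × String)) :=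
  let d' := pvBFlush (d, p)
  if d'.contains "topic" then [d'.items] else []

-- common recursive form: parse the rest of the lines continuing from block-state (d, p)
def pvContParse : List String → PySem.Dict String String → Option (List String) → List (List (String × String))
  | [], d, p => pvEmit d p
  | l :: ls, d, p =>
    if PySem.Str.startswith (PySem.Str.strip l) "POST" then
      pvEmit d p ++ pvContParse ls PySem.Dict.empty none
    else
      let st := pvBBlockStep (d, p) l
      pvContParse ls st.1 st.2

lemma pvContains_nil (d : PySem.Dict String String) (h : d.items = []) :
    d.contains "topic" = false := by
  cases d with | mk it => simp_all [PySem.Dict.contains]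

lemma pvContains_ins_nil (d : PySem.Dict String String) (h : d.items = []) (v : String) :
    (d.insert "caption" v).contains "topic" = false := by
  rw [PySem.Dict.contains_insert]
  simp [pvContains_nil d h]

lemma pvAFlushInto_eq (posts : List (List (String × String))) (cur : PySem.Dict String String)
    (field : Option String) (ml : List String)
    (h : field = none ∨ field = some "caption") :
    pvAFlushInto posts cur field ml = posts ++ pvEmit cur (pvPend field ml) := by
  rcases h with rfl | rfl
  · simp only [pvAFlushInto, pvEmit, pvBFlush, pvPend, Option.map_none]
    by_cases hc : cur.items = []
    · simp [hc, pvContains_nil cur hc]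
    · by_cases ht : cur.contains "topic" <;> simp [hc, ht]
  · simp only [pvAFlushInto, pvEmit, pvBFlush, pvPend, Option.map_some]
    by_cases hml : ml = []
    · subst hml
      by_cases hc : cur.items = []
      · simp [hc, pvContains_nil cur hc]
      · by_cases ht : cur.contains "topic" <;> simp [hc, ht]
    · by_cases hc : cur.items = []
      · simp [hc, hml, pvContains_ins_nil cur hc]
      · by_cases ht : (cur.insert "caption" (PySem.Str.join " " ml)).contains "topic" <;>
          simp [hc, hml, ht]

lemma pvA_main (ls : List String) : ∀ (posts : List (List (String × String)))
    (cur : PySem.Dict String String) (field : Option String) (ml : List String),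
    (field = none ∨ field = some "caption") →
    (let st := ls.foldl pvAStep (posts, cur, field, ml);
     pvAFlushInto st.1 st.2.1 st.2.2.1 st.2.2.2) = posts ++ pvContParse ls cur (pvPend field ml) := by
  induction ls with
  | nil =>
    intro posts cur field ml h
    simpa [pvContParse] using pvAFlushInto_eq posts cur field ml h
  | cons l ls ih =>
    intro posts cur field ml h
    simp only [List.foldl_cons]
    by_cases h1 : PySem.Str.startswith (PySem.Str.strip l) "POST" <;> simp at h1
    · rw [show pvAStep (posts, cur, field, ml) l
          = (pvAFlushInto posts cur field ml, PySem.Dict.empty, none, []) from by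
        simp [pvAStep, h1]]
      rw [ih _ _ _ _ (Or.inl rfl)]
      rw [pvAFlushInto_eq _ _ _ _ h]
      simp [pvContParse, h1, pvPend, List.append_assoc]
    · by_cases h2 : PySem.Str.startswith (PySem.Str.strip l) "TOPIC:" <;> simp at h2
      · rw [show pvAStep (posts, cur, field, ml) l
            = (posts, cur.insert "topic" (PySem.Str.strip (PySem.Str.replace (PySem.Str.strip l) "TOPIC:" "")), none, ml) from by
          simp [pvAStep, h1, h2]]
        rw [ih _ _ _ _ (Or.inl rfl)]
        simp [pvContParse, h1, pvBBlockStep, h2, pvPend]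
      · by_cases h3 : PySem.Str.startswith (PySem.Str.strip l) "TYPE:" <;> simp at h3
        · rw [show pvAStep (posts, cur, field, ml) l
              = (posts, cur.insert "content_type" (PySem.Str.strip (PySem.Str.replace (PySem.Str.strip l) "TYPE:" "")), none, ml) from by
            simp [pvAStep, h1, h2, h3]]
          rw [ih _ _ _ _ (Or.inl rfl)]
          simp [pvContParse, h1, pvBBlockStep, h2, h3, pvPend]
        · by_cases h4 : PySem.Str.startswith (PySem.Str.strip l) "CAPTION:" <;> simp at h4
          · rw [show pvAStep (posts, cur, field, ml) l
                = (posts, cur, some "caption",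
                    if PySem.Str.strip (PySem.Str.replace (PySem.Str.strip l) "CAPTION:" "") ≠ "" then
                      [PySem.Str.strip (PySem.Str.replace (PySem.Str.strip l) "CAPTION:" "")]
                    else []) from by
              simp [pvAStep, h1, h2, h3, h4]]
            rw [ih _ _ _ _ (Or.inr rfl)]
            simp [pvContParse, h1, pvBBlockStep, h2, h3, h4, pvPend]
          · by_cases h5 : PySem.Str.startswith (PySem.Str.strip l) "HASHTAGS:" <;> simp at h5
            · rcases h with rfl | rfl
              · rw [show pvAStep (posts, cur, none, ml) l
                    = (posts, cur.insert "hashtags" (PySem.Str.strip (PySem.Str.replace (PySem.Str.strip l) "HASHTAGS:" "")), none, ml) from by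
                  simp [pvAStep, h1, h2, h3, h4, h5]]
                rw [ih _ _ _ _ (Or.inl rfl)]
                simp [pvContParse, h1, pvBBlockStep, h2, h3, h4, h5, pvPend]
              · by_cases hml : ml = []
                · subst hml
                  rw [show pvAStep (posts, cur, some "caption", ([] : List String)) l
                      = (posts, cur.insert "hashtags" (PySem.Str.strip (PySem.Str.replace (PySem.Str.strip l) "HASHTAGS:" "")), none, []) from by
                    simp [pvAStep, h1, h2, h3, h4, h5]]
                  rw [ih _ _ _ _ (Or.inl rfl)]
                  simp [pvContParse, h1, pvBBlockStep, h2, h3, h4, h5, pvPend]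
                · rw [show pvAStep (posts, cur, some "caption", ml) l
                      = (posts, (cur.insert "caption" (PySem.Str.join " " ml)).insert "hashtags"
                          (PySem.Str.strip (PySem.Str.replace (PySem.Str.strip l) "HASHTAGS:" "")), none, []) from by
                    simp [pvAStep, h1, h2, h3, h4, h5, hml]]
                  rw [ih _ _ _ _ (Or.inl rfl)]
                  simp [pvContParse, h1, pvBBlockStep, h2, h3, h4, h5, hml, pvPend]
            · by_cases h6 : PySem.Str.startswith (PySem.Str.strip l) "CTA:" <;> simp at h6
              · rw [show pvAStep (posts, cur, field, ml) l
                    = (posts, cur.insert "cta" (PySem.Str.strip (PySem.Str.replace (PySem.Str.strip l) "CTA:" "")), none, ml) from by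
                  simp [pvAStep, h1, h2, h3, h4, h5, h6]]
                rw [ih _ _ _ _ (Or.inl rfl)]
                simp [pvContParse, h1, pvBBlockStep, h2, h3, h4, h5, h6, pvPend]
              · by_cases h7 : PySem.Str.strip l ≠ "" ∧ field = some "caption"
                · obtain ⟨hs, rfl⟩ := h7
                  rw [show pvAStep (posts, cur, some "caption", ml) l
                      = (posts, cur, some "caption", ml ++ [PySem.Str.strip l]) from by
                    simp [pvAStep, h1, h2, h3, h4, h5, h6, hs]]
                  rw [ih _ _ _ _ (Or.inr rfl)]
                  simp [pvContParse, h1, pvBBlockStep, h2, h3, h4, h5, h6, hs, pvPend]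
                · rw [show pvAStep (posts, cur, field, ml) l = (posts, cur, field, ml) from by
                    simp [pvAStep, h1, h2, h3, h4, h5, h6, h7]]
                  rw [ih _ _ _ _ h]
                  have hB : pvBBlockStep (cur, pvPend field ml) l = (cur, pvPend field ml) := by
                    rcases h with rfl | rfl
                    · simp [pvBBlockStep, h2, h3, h4, h5, h6, pvPend]
                    · have hs : ¬ PySem.Str.strip l ≠ "" := by
                        intro hs; exact h7 ⟨hs, rfl⟩
                      simp [pvBBlockStep, h2, h3, h4, h5, h6, hs, pvPend]
                  simp [pvContParse, h1, hB]

lemma pvBProc_append_one (bs : List (List String)) (b : List String) :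
    (bs ++ [b]).foldl pvBProcStep [] =
      bs.foldl pvBProcStep [] ++ pvEmit (b.foldl pvBBlockStep (PySem.Dict.empty, none)).1
        (b.foldl pvBBlockStep (PySem.Dict.empty, none)).2 := by
  rw [List.foldl_append]
  simp only [List.foldl_cons, List.foldl_nil, pvBProcStep, pvParseBlock, pvEmit]
  by_cases ht : (pvBFlush (b.foldl pvBBlockStep (PySem.Dict.empty, none))).contains "topic" <;>
    simp [ht]

lemma pvB_main (ls : List String) : ∀ (bs : List (List String)) (cb : List String),
    (let st := ls.foldl pvBSplitStep (bs, cb);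
     (st.1 ++ [st.2]).foldl pvBProcStep []) =
      bs.foldl pvBProcStep [] ++
        pvContParse ls (cb.foldl pvBBlockStep (PySem.Dict.empty, none)).1
          (cb.foldl pvBBlockStep (PySem.Dict.empty, none)).2 := by
  induction ls with
  | nil =>
    intro bs cb
    simpa [pvContParse] using pvBProc_append_one bs cb
  | cons l ls ih =>
    intro bs cb
    simp only [List.foldl_cons]
    by_cases h1 : PySem.Str.startswith (PySem.Str.strip l) "POST" <;> simp at h1
    · rw [show pvBSplitStep (bs, cb) l = (bs ++ [cb], []) from by simp [pvBSplitStep, h1]]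
      rw [ih (bs ++ [cb]) []]
      rw [pvBProc_append_one bs cb]
      simp [pvContParse, h1, List.append_assoc]
    · rw [show pvBSplitStep (bs, cb) l = (bs, cb ++ [l]) from by simp [pvBSplitStep, h1]]
      rw [ih bs (cb ++ [l])]
      rw [List.foldl_append]
      simp only [List.foldl_cons, List.foldl_nil]
      simp [pvContParse, h1]
-- ===== VERDICT (by name: the statement is the Claim_ definition above) =====
theorem parse_posts_response_py_spec : Claim_equal_parse_posts_response_py := by
  intro content _
  unfold Spec_parse_posts_response_py parse_posts_response_py parse_posts_response_py_alt
  have hA := pvA_main (pvLines content) [] PySem.Dict.empty none [] (Or.inl rfl)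
  have hB := pvB_main (pvLines content) [] []
  simp only [List.foldl_nil] at hA hB
  simp only [hA, hB, pvPend, Option.map_none, List.nil_append]
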